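-- pv_equiv track=rewrite | github.com/apostolovbg/webcam-micro | devcovenant/core/cli_support.py | resolve_cli_output_mode_override
-- ===== SOURCE A (Python) =====
-- from typing import Literal, Sequence, TextIO
--
-- OutputMode = Literal["normal", "verbose", "quiet"]
--
-- _OUTPUT_MODE_OVERRIDE_FLAG_MAP: dict[str, OutputMode] = {
--     "--quiet": "quiet",
--     "--normal": "normal",
--     "--verbose": "verbose",
-- }
--
-- def resolve_cli_output_mode_override(argv: Sequence[str]) -> OutputMode | None:
--     """Resolve a consistent CLI output-mode override before `--`."""
--     override: OutputMode | None = None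
--     for token in argv:
--         if token == "--":
--             break
--         candidate = _OUTPUT_MODE_OVERRIDE_FLAG_MAP.get(str(token).strip())
--         if candidate is None:
--             continue
--         if override is not None and override != candidate:
--             raise ValueError(
--                 "Output-mode overrides are mutually exclusive. Choose only "
--                 "one of `--quiet`, `--normal`, or `--verbose`."
--             )
--         override = candidate
--     return override
-- ===== SOURCE B (Python) =====
-- _OUTPUT_MODE_OVERRIDE_FLAG_MAP = {
--     "--quiet": "quiet",
--     "--normal": "normal",
--     "--verbose": "verbose",
-- }
--
-- def resolve_cli_output_mode_override(argv):
--     """Resolve a consistent CLI output-mode override before `--`."""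
--     head = []
--     for token in argv:
--         if token == "--":
--             break
--         head.append(str(token).strip())
--     modes = [
--         mode
--         for flag, mode in _OUTPUT_MODE_OVERRIDE_FLAG_MAP.items()
--         if flag in head
--     ]
--     if len(modes) > 1:
--         raise ValueError(
--             "Output-mode overrides are mutually exclusive. Choose only "
--             "one of `--quiet`, `--normal`, or `--verbose`."
--         )
--     return modes[0] if modes else None
-- ===== Notes on version B (the rewrite author's own statement) =====
-- stated objective: alternative
-- what changed: B inverts the traversal: it strips the tokens before '--' once, then iterates over the three flags of the map and membership-tests each flag against that token list, instead of A's scan of argv with a per-token dict lookup and an in-loop conflict check.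
import Mathlib
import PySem

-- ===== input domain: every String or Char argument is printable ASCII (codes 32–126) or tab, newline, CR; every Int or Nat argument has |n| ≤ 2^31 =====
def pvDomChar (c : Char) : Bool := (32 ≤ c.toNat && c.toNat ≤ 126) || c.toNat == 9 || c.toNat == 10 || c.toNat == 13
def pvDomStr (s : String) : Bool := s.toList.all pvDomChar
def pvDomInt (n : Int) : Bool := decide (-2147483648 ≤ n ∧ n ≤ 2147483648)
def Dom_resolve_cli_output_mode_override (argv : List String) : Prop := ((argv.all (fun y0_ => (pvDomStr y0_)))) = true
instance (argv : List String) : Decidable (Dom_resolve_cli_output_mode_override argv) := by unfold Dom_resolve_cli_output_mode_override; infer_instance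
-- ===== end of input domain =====

-- B inverts the traversal: it strips the tokens before '--' once, then iterates over the
-- three flags of the map, membership-testing each against that token list, instead of A's
-- argv scan with a per-token dict lookup and in-loop conflict check; objective: alternative.

-- shared module constant: _OUTPUT_MODE_OVERRIDE_FLAG_MAP
def pvFlagMap : PySem.Dict String String :=
  PySem.Dict.ofList [("--quiet", "quiet"), ("--normal", "normal"), ("--verbose", "verbose")]

-- ===== PORT A =====
-- the for-loop of A: accumulator `override`; the ValueError path returns none (excluded by Pre_)
def pvLoopA : List String → Option String → Option String
  | [], ov => ov
  | t :: rest, ov =>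
    if t = "--" then ov
    else
      match pvFlagMap.get? (PySem.Str.strip t) with
      | none => pvLoopA rest ov
      | some c =>
        if ov ≠ none ∧ ov ≠ some c then none  -- raise ValueError (outside Pre_)
        else pvLoopA rest (some c)

def resolve_cli_output_mode_override (argv : List String) : Option String :=
  pvLoopA argv none

-- ===== PORT B =====
-- B's first loop: collect the stripped tokens before "--"
def pvHeadB : List String → List String
  | [] => []
  | t :: rest => if t = "--" then [] else PySem.Str.strip t :: pvHeadB rest

def resolve_cli_output_mode_override_alt (argv : List String) : Option String :=
  let head := pvHeadB argv
  let modes := pvFlagMap.items.filterMap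
    (fun fm => if head.contains fm.1 then some fm.2 else none)
  if modes.length > 1 then none  -- raise ValueError (outside Pre_)
  else modes.head?  -- modes[0] if modes else None

-- ===== PRECONDITION & SPEC =====
-- the resolved modes among the tokens before "--"
def pvModes (argv : List String) : List String :=
  (argv.takeWhile (· ≠ "--")).filterMap (fun t => pvFlagMap.get? (PySem.Str.strip t))

-- Pre_ excludes exactly the inputs where A (and B) raise ValueError: two distinct
-- output-mode flags before "--".
def Pre_resolve_cli_output_mode_override (argv : List String) : Prop :=
  ∀ m ∈ pvModes argv, ∀ m' ∈ pvModes argv, m = m'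
instance (argv : List String) : Decidable (Pre_resolve_cli_output_mode_override argv) := by
  unfold Pre_resolve_cli_output_mode_override; infer_instance

def pvWitness_resolve_cli_output_mode_override : List String :=
  ["--verbose", "x", " --verbose ", "--", "--quiet"]

def Spec_resolve_cli_output_mode_override (argv : List String) (out : Option String) : Prop := out = resolve_cli_output_mode_override_alt argv
instance (argv : List String) (out : Option String) : Decidable (Spec_resolve_cli_output_mode_override argv out) := by unfold Spec_resolve_cli_output_mode_override; infer_instance

-- ===== CLAIM (what is proved, stated in full; the proofs are below) =====
def Claim_equal_resolve_cli_output_mode_override : Prop := ∀ (argv : List String), Dom_resolve_cli_output_mode_override argv → Pre_resolve_cli_output_mode_override argv → Spec_resolve_cli_output_mode_override argv (resolve_cli_output_mode_override argv)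

-- ===== LEMMAS AND PROOFS =====

-- unfolding pvModes over a cons
theorem pvModes_nil : pvModes [] = [] := rfl

theorem pvModes_cons (t : String) (rest : List String) :
    pvModes (t :: rest) =
      if t = "--" then []
      else match pvFlagMap.get? (PySem.Str.strip t) with
           | none => pvModes rest
           | some c => c :: pvModes rest := by
  by_cases h : t = "--"
  · simp [pvModes, List.takeWhile, h]
  · simp only [pvModes, List.takeWhile, h, decide_not, Bool.not_false,
      List.filterMap_cons, decide_false]
    cases hget : pvFlagMap.get? (PySem.Str.strip t) <;> simp

-- A's loop computes: first mode of pvModes (all equal under Pre_), or the accumulator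
theorem pvLoopA_eq (l : List String) :
    ∀ ov : Option String,
      (∀ m ∈ pvModes l, ∀ m' ∈ pvModes l, m = m') →
      (∀ m ∈ pvModes l, ov = none ∨ ov = some m) →
      pvLoopA l ov = match pvModes l with | [] => ov | m :: _ => some m := by
  induction l with
  | nil => intro ov _ _; simp [pvModes_nil, pvLoopA]
  | cons t rest ih =>
    intro ov hall hcomp
    rw [pvModes_cons] at hall hcomp ⊢
    by_cases h : t = "--"
    · simp [h, pvLoopA]
    · simp only [if_neg h] at hall hcomp ⊢
      unfold pvLoopA
      rw [if_neg h]
      cases hget : pvFlagMap.get? (PySem.Str.strip t) with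
      | none =>
        simp only [hget] at hall hcomp ⊢
        exact ih ov hall hcomp
      | some c =>
        simp only [hget] at hall hcomp ⊢
        have hov : ov = none ∨ ov = some c := hcomp c (by simp)
        have hnot : ¬ (ov ≠ none ∧ ov ≠ some c) := by
          rcases hov with h' | h' <;> simp [h']
        rw [if_neg hnot]
        have hall' : ∀ m ∈ pvModes rest, ∀ m' ∈ pvModes rest, m = m' := by
          intro m hm m' hm'; exact hall m (by simp [hm]) m' (by simp [hm'])
        have heqc : ∀ m ∈ pvModes rest, m = c := by
          intro m hm; exact hall m (by simp [hm]) c (by simp)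
        have := ih (some c) hall' (fun m hm => Or.inr (by rw [heqc m hm]))
        rw [this]
        cases hms : pvModes rest with
        | nil => simp
        | cons m ms => simp [heqc m (by simp [hms])]

-- A at the top level (override starts as None)
theorem portA_eq (argv : List String)
    (h : ∀ m ∈ pvModes argv, ∀ m' ∈ pvModes argv, m = m') :
    resolve_cli_output_mode_override argv =
      match pvModes argv with | [] => none | m :: _ => some m := by
  unfold resolve_cli_output_mode_override
  exact pvLoopA_eq argv none h (fun m _ => Or.inl rfl)

-- pvModes is the filterMap of the map lookup over B's stripped head
theorem pvModes_eq_head (argv : List String) :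
    pvModes argv = (pvHeadB argv).filterMap pvFlagMap.get? := by
  induction argv with
  | nil => rfl
  | cons t rest ih =>
    rw [pvModes_cons]
    by_cases h : t = "--"
    · simp [h, pvHeadB]
    · simp only [if_neg h, pvHeadB, List.filterMap_cons]
      cases hget : pvFlagMap.get? (PySem.Str.strip t) <;> simp [ih]

-- the three lookups of the literal map
theorem get?_quiet : pvFlagMap.get? "--quiet" = some "quiet" := by decide
theorem get?_normal : pvFlagMap.get? "--normal" = some "normal" := by decide
theorem get?_verbose : pvFlagMap.get? "--verbose" = some "verbose" := by decide

-- any successful lookup in the literal map is one of its three entries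
theorem get?_cases (f c : String) (h : pvFlagMap.get? f = some c) :
    (f = "--quiet" ∧ c = "quiet") ∨ (f = "--normal" ∧ c = "normal") ∨
    (f = "--verbose" ∧ c = "verbose") := by
  by_cases h1 : f = "--quiet"
  · subst h1; rw [get?_quiet] at h; exact Or.inl ⟨rfl, (Option.some_inj.mp h).symm⟩
  by_cases h2 : f = "--normal"
  · subst h2; rw [get?_normal] at h; exact Or.inr (Or.inl ⟨rfl, (Option.some_inj.mp h).symm⟩)
  by_cases h3 : f = "--verbose"
  · subst h3; rw [get?_verbose] at h; exact Or.inr (Or.inr ⟨rfl, (Option.some_inj.mp h).symm⟩)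
  · exfalso
    have hm : pvFlagMap = PySem.Dict.mk
        [("--quiet","quiet"),("--normal","normal"),("--verbose","verbose")] := by decide
    rw [hm] at h
    simp [Ne.symm h1, Ne.symm h2, Ne.symm h3, PySem.Dict.get?] at h

-- under Pre_, B's flag-membership test reduces to pvModes, giving B the same result as A
theorem portB_eq (argv : List String)
    (h : ∀ m ∈ pvModes argv, ∀ m' ∈ pvModes argv, m = m') :
    resolve_cli_output_mode_override_alt argv =
      match pvModes argv with | [] => none | m :: _ => some m := by
  simp only [resolve_cli_output_mode_override_alt]
  have hitems : pvFlagMap.items =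
      [("--quiet","quiet"),("--normal","normal"),("--verbose","verbose")] := by decide
  rw [hitems]
  have hmem : ∀ f c, pvFlagMap.get? f = some c →
      (f ∈ pvHeadB argv ↔ c ∈ pvModes argv) := by
    intro f c hfc
    rw [pvModes_eq_head argv]
    constructor
    · intro hf
      exact List.mem_filterMap.mpr ⟨f, hf, hfc⟩
    · intro hc
      obtain ⟨g, hg, hgc⟩ := List.mem_filterMap.mp hc
      rcases get?_cases f c hfc with ⟨hf1, hc1⟩ | ⟨hf1, hc1⟩ | ⟨hf1, hc1⟩ <;>
        rcases get?_cases g c hgc with ⟨hg1, hc2⟩ | ⟨hg1, hc2⟩ | ⟨hg1, hc2⟩ <;>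
          first
          | (subst hf1; subst hg1; exact hg)
          | (exfalso; rw [hc1] at hc2; exact absurd hc2 (by decide))
  cases hms : pvModes argv with
  | nil =>
    have hq : "--quiet" ∉ pvHeadB argv := fun hh => by
      have := (hmem "--quiet" "quiet" get?_quiet).mp hh; rw [hms] at this; simp at this
    have hn : "--normal" ∉ pvHeadB argv := fun hh => by
      have := (hmem "--normal" "normal" get?_normal).mp hh; rw [hms] at this; simp at this
    have hv : "--verbose" ∉ pvHeadB argv := fun hh => by
      have := (hmem "--verbose" "verbose" get?_verbose).mp hh; rw [hms] at this; simp at this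
    simp [List.filterMap, hq, hn, hv]
  | cons c ms =>
    have hc : c ∈ pvModes argv := by rw [hms]; simp
    have hall : ∀ m ∈ pvModes argv, m = c := fun m hm => h m hm c hc
    have hcases : c = "quiet" ∨ c = "normal" ∨ c = "verbose" := by
      rw [pvModes_eq_head argv] at hc
      obtain ⟨g, _, hgc⟩ := List.mem_filterMap.mp hc
      rcases get?_cases g c hgc with ⟨_, h1⟩ | ⟨_, h1⟩ | ⟨_, h1⟩ <;> simp [h1]
    have hcont : ∀ f m, pvFlagMap.get? f = some m → (f ∈ pvHeadB argv ↔ m = c) := by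
      intro f m hfm
      constructor
      · intro hf; exact hall m ((hmem f m hfm).mp hf)
      · intro hmc; subst hmc; exact (hmem f m hfm).mpr hc
    rcases hcases with h1 | h1 | h1 <;> subst h1
    · have hq : "--quiet" ∈ pvHeadB argv := (hcont _ _ get?_quiet).mpr rfl
      have hn : "--normal" ∉ pvHeadB argv := fun hh => by
        simpa using (hcont _ _ get?_normal).mp hh
      have hv : "--verbose" ∉ pvHeadB argv := fun hh => by
        simpa using (hcont _ _ get?_verbose).mp hh
      simp [List.filterMap, hq, hn, hv]
    · have hq : "--quiet" ∉ pvHeadB argv := fun hh => by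
        simpa using (hcont _ _ get?_quiet).mp hh
      have hn : "--normal" ∈ pvHeadB argv := (hcont _ _ get?_normal).mpr rfl
      have hv : "--verbose" ∉ pvHeadB argv := fun hh => by
        simpa using (hcont _ _ get?_verbose).mp hh
      simp [List.filterMap, hq, hn, hv]
    · have hq : "--quiet" ∉ pvHeadB argv := fun hh => by
        simpa using (hcont _ _ get?_quiet).mp hh
      have hn : "--normal" ∉ pvHeadB argv := fun hh => by
        simpa using (hcont _ _ get?_normal).mp hh
      have hv : "--verbose" ∈ pvHeadB argv := (hcont _ _ get?_verbose).mpr rfl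
      simp [List.filterMap, hq, hn, hv]

-- ===== VERDICT (by name: the statement is the Claim_ definition above) =====
theorem resolve_cli_output_mode_override_spec : Claim_equal_resolve_cli_output_mode_override := by
  intro argv _ hpre
  unfold Spec_resolve_cli_output_mode_override
  rw [portA_eq argv hpre, portB_eq argv hpre]
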